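-- pv_equiv track=rewrite | github.com/brunobajs/Kirax.ai | app.py | escolher_indice_modelo_padrao
-- ===== SOURCE A (Python) =====
-- def escolher_indice_modelo_padrao(modelos: list[str]) -> int:
--     """
--     Tenta escolher um modelo GPT-4 como padrão.
--     Se não encontrar, usa o primeiro da lista.
--     """
--     preferidos = [
--         "openai/gpt-4.1-mini",
--         "openai/gpt-4o-mini",
--         "openai/gpt-4.1",
--         "openai/gpt-4o",
--         "openai/gpt-4",
--     ]
--     for pref in preferidos:
--         if pref in modelos:
--             return modelos.index(pref)
--     for i, mid in enumerate(modelos):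
--         if "gpt-4" in mid.lower():
--             return i
--     return 0
-- ===== SOURCE B (Python) =====
-- def escolher_indice_modelo_padrao(modelos: list[str]) -> int:
--     """Single pass: rank table for the preferred models + first-gpt-4 fallback index."""
--     rank = {
--         "openai/gpt-4.1-mini": 0,
--         "openai/gpt-4o-mini": 1,
--         "openai/gpt-4.1": 2,
--         "openai/gpt-4o": 3,
--         "openai/gpt-4": 4,
--     }
--     best_rank = None
--     best_idx = 0
--     first_gpt4 = None
--     for i, m in enumerate(modelos):
--         r = rank.get(m)
--         if r is not None and (best_rank is None or r < best_rank):
--             best_rank = r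
--             best_idx = i
--         if first_gpt4 is None and "gpt-4" in m.lower():
--             first_gpt4 = i
--     if best_rank is not None:
--         return best_idx
--     if first_gpt4 is not None:
--         return first_gpt4
--     return 0
-- ===== Notes on version B (the rewrite author's own statement) =====
-- stated objective: alternative
-- what changed: Replaces A's five separate membership+index scans over modelos (plus a second fallback loop) by a precomputed rank table and one single pass that keeps the best-rank/best-index pair and the first gpt-4 index.
import Mathlib
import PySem

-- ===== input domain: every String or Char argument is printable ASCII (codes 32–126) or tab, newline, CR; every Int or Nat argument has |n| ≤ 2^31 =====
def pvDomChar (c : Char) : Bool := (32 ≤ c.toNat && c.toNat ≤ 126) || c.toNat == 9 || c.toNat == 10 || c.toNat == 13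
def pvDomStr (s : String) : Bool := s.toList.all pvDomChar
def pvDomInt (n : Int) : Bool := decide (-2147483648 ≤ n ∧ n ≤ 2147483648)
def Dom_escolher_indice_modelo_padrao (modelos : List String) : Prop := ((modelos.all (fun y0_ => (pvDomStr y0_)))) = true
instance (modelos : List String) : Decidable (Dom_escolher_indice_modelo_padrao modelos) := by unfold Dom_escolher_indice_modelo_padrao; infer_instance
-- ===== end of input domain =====

-- B replaces A's five membership+index scans and separate fallback loop by one rank table
-- and a single pass keeping best-rank/best-index and the first gpt-4 index (objective: alternative).

-- ===== PORT A =====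
def pvPreferidos : List String :=
  ["openai/gpt-4.1-mini", "openai/gpt-4o-mini", "openai/gpt-4.1", "openai/gpt-4o", "openai/gpt-4"]

-- 'for pref in preferidos: if pref in modelos: return modelos.index(pref)'
def pvLoopPref (modelos : List String) : List String → Option Int
  | [] => none
  | p :: ps =>
    if p ∈ modelos then some (((PySem.List.index? modelos p).getD 0 : Nat) : Int)
    else pvLoopPref modelos ps

-- 'for i, mid in enumerate(modelos): if "gpt-4" in mid.lower(): return i'
def pvLoopG4 : List (Int × String) → Option Int
  | [] => none
  | (i, mid) :: rest =>
    if PySem.Str.isIn "gpt-4" (PySem.Str.lower mid) then some i else pvLoopG4 rest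

def escolher_indice_modelo_padrao (modelos : List String) : Int :=
  match pvLoopPref modelos pvPreferidos with
  | some r => r
  | none =>
    match pvLoopG4 (PySem.List.enumerate modelos 0) with
    | some i => i
    | none => 0

-- ===== PORT B =====
def pvRank : PySem.Dict String Int :=
  ((((PySem.Dict.empty.insert "openai/gpt-4.1-mini" 0).insert "openai/gpt-4o-mini" 1).insert
      "openai/gpt-4.1" 2).insert "openai/gpt-4o" 3).insert "openai/gpt-4" 4

-- the body of B's single loop: state = (best_rank, best_idx, first_gpt4)
def pvStepB (s : Option Int × Int × Option Int) (im : Int × String) :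
    Option Int × Int × Option Int :=
  let (bestRank, bestIdx, firstG4) := s
  let (i, m) := im
  let (bestRank, bestIdx) :=
    match pvRank.get? m with
    | some rv =>
      match bestRank with
      | none => (some rv, i)
      | some br => if rv < br then (some rv, i) else (bestRank, bestIdx)
    | none => (bestRank, bestIdx)
  let firstG4 :=
    match firstG4 with
    | none => if PySem.Str.isIn "gpt-4" (PySem.Str.lower m) then some i else none
    | some _ => firstG4
  (bestRank, bestIdx, firstG4)

def escolher_indice_modelo_padrao_alt (modelos : List String) : Int :=
  match (PySem.List.enumerate modelos 0).foldl pvStepB (none, 0, none) with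
  | (some _, bi, _) => bi
  | (none, _, some g) => g
  | (none, _, none) => 0

-- ===== PRECONDITION & SPEC =====
def Spec_escolher_indice_modelo_padrao (modelos : List String) (out : Int) : Prop := out = escolher_indice_modelo_padrao_alt modelos
instance (modelos : List String) (out : Int) : Decidable (Spec_escolher_indice_modelo_padrao modelos out) := by unfold Spec_escolher_indice_modelo_padrao; infer_instance

-- ===== CLAIM (what is proved, stated in full; the proofs are below) =====
def Claim_equal_escolher_indice_modelo_padrao : Prop := ∀ (modelos : List String), Dom_escolher_indice_modelo_padrao modelos → Spec_escolher_indice_modelo_padrao modelos (escolher_indice_modelo_padrao modelos)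

-- ===== LEMMAS AND PROOFS =====

-- leftmost-minimum choice: keep the left element unless the right one is strictly better
def pvMerge : Option (Nat × Int) → Option (Nat × Int) → Option (Nat × Int)
  | none, b => b
  | some a, none => some a
  | some a, some b => if b.1 < a.1 then some b else some a

-- (rank, index) of the leftmost best-ranked element of ms starting at index i
def pvSpecMin (prefs : List String) : List String → Int → Option (Nat × Int)
  | [], _ => none
  | m :: ms, i =>
    pvMerge ((PySem.List.index? prefs m).map (fun r => (r, i))) (pvSpecMin prefs ms (i + 1))

def pvOr : Option Int → Option Int → Option Int
  | some g, _ => some g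
  | none, y => y

def pvFirstG4 : List String → Int → Option Int
  | [], _ => none
  | m :: ms, i =>
    if PySem.Str.isIn "gpt-4" (PySem.Str.lower m) then some i else pvFirstG4 ms (i + 1)

theorem pvMerge_assoc (a b c : Option (Nat × Int)) :
    pvMerge (pvMerge a b) c = pvMerge a (pvMerge b c) := by
  rcases a with _ | a
  · rfl
  rcases b with _ | b
  · rfl
  rcases c with _ | c
  · by_cases h1 : b.1 < a.1 <;> simp [pvMerge, h1]
  · by_cases h1 : b.1 < a.1 <;> by_cases h2 : c.1 < b.1 <;>
      simp [pvMerge, h1, h2] <;> first | rfl | (intros; exfalso; omega)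

theorem pvLoopG4_eq (ms : List String) (i : Int) :
    pvLoopG4 (PySem.List.enumerate ms i) = pvFirstG4 ms i := by
  induction ms generalizing i with
  | nil => simp [PySem.List.enumerate_nil, pvLoopG4, pvFirstG4]
  | cons m ms ih => simp [PySem.List.enumerate_cons, pvLoopG4, pvFirstG4, ih]

theorem pvSpecMin_nil_prefs (ms : List String) (i : Int) : pvSpecMin [] ms i = none := by
  induction ms generalizing i with
  | nil => rfl
  | cons m ms ih => simp [pvSpecMin, PySem.List.index?_eq_idxOf?, ih, pvMerge]

theorem pvSpecMin_mem (p : String) (ps ms : List String) (i : Int) (h : p ∈ ms) :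
    pvSpecMin (p :: ps) ms i = some (0, i + (((PySem.List.index? ms p).getD 0 : Nat) : Int)) := by
  induction ms generalizing i with
  | nil => cases h
  | cons m ms ih =>
    by_cases hm : m = p
    · subst hm
      rw [pvSpecMin, PySem.List.index?_cons_self, PySem.List.index?_cons_self]
      rcases hrest : pvSpecMin (m :: ps) ms (i + 1) with _ | q <;>
        simp [pvMerge]
    · have hp : p ∈ ms := by
        rcases List.mem_cons.mp h with h | h
        · exact absurd h.symm hm
        · exact h
      rw [pvSpecMin, PySem.List.index?_cons_of_ne _ hm,
        PySem.List.index?_cons_of_ne _ (fun e => hm e.symm), ih _ hp]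
      rcases hk : PySem.List.index? ms p with _ | k
      · rw [PySem.List.index?_eq_none_iff] at hk; exact absurd hp hk
      · rcases hh : PySem.List.index? ps m with _ | r
        · simp [pvMerge]; ring
        · simp [pvMerge]; ring
  
theorem pvSpecMin_shift (p : String) (ps ms : List String) (i : Int) (h : p ∉ ms) :
    pvSpecMin (p :: ps) ms i = (pvSpecMin ps ms i).map (fun q => (q.1 + 1, q.2)) := by
  induction ms generalizing i with
  | nil => rfl
  | cons m ms ih =>
    have hm : m ≠ p := fun e => h (e ▸ List.mem_cons_self ..)
    have hms : p ∉ ms := fun e => h (List.mem_cons_of_mem _ e)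
    rw [pvSpecMin, pvSpecMin, PySem.List.index?_cons_of_ne _ (Ne.symm hm), ih _ hms]
    rcases PySem.List.index? ps m with _ | r <;>
      rcases pvSpecMin ps ms (i + 1) with _ | q <;>
        simp [pvMerge] <;> split_ifs <;> simp_all

theorem pvLoopPref_eq (prefs ms : List String) :
    pvLoopPref ms prefs = (pvSpecMin prefs ms 0).map (·.2) := by
  induction prefs with
  | nil => simp [pvLoopPref, pvSpecMin_nil_prefs]
  | cons p ps ih =>
    by_cases h : p ∈ ms
    · rw [pvLoopPref, if_pos h, pvSpecMin_mem p ps ms 0 h]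
      simp
    · rw [pvLoopPref, if_neg h, pvSpecMin_shift p ps ms 0 h, ih]
      rcases pvSpecMin ps ms 0 with _ | q <;> simp

theorem pvRank_eq (m : String) :
    pvRank.get? m = (PySem.List.index? pvPreferidos m).map (fun n => (n : Int)) := by
  by_cases h1 : ("openai/gpt-4.1-mini" : String) = m
  · subst h1; decide
  by_cases h2 : ("openai/gpt-4o-mini" : String) = m
  · subst h2; decide
  by_cases h3 : ("openai/gpt-4.1" : String) = m
  · subst h3; decide
  by_cases h4 : ("openai/gpt-4o" : String) = m
  · subst h4; decide
  by_cases h5 : ("openai/gpt-4" : String) = m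
  · subst h5; decide
  · rw [pvPreferidos, PySem.List.index?_cons_of_ne _ h1,
      PySem.List.index?_cons_of_ne _ h2, PySem.List.index?_cons_of_ne _ h3,
      PySem.List.index?_cons_of_ne _ h4, PySem.List.index?_cons_of_ne _ h5]
    have n1 : m ≠ "openai/gpt-4.1-mini" := fun e => h1 e.symm
    have n2 : m ≠ "openai/gpt-4o-mini" := fun e => h2 e.symm
    have n3 : m ≠ "openai/gpt-4.1" := fun e => h3 e.symm
    have n4 : m ≠ "openai/gpt-4o" := fun e => h4 e.symm
    have n5 : m ≠ "openai/gpt-4" := fun e => h5 e.symm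
    simp [pvRank, PySem.Dict.get?_insert, n1, n2, n3, n4, n5, PySem.Dict.get?_empty]

-- encode the abstract best as B's (best_rank, best_idx) pair, with bi0 the idle best_idx
def pvEnc (b : Option (Nat × Int)) (bi0 : Int) : Option Int × Int :=
  match b with
  | some q => (some ((q.1 : Nat) : Int), q.2)
  | none => (none, bi0)

theorem pvFold_inv (ms : List String) (i : Int) (b : Option (Nat × Int)) (bi0 : Int)
    (g : Option Int) :
    (PySem.List.enumerate ms i).foldl pvStepB ((pvEnc b bi0).1, (pvEnc b bi0).2, g) =
      ((pvEnc (pvMerge b (pvSpecMin pvPreferidos ms i)) bi0).1,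
        (pvEnc (pvMerge b (pvSpecMin pvPreferidos ms i)) bi0).2,
        pvOr g (pvFirstG4 ms i)) := by
  induction ms generalizing i b g with
  | nil =>
    rcases b with _ | q <;> rcases g with _ | gg <;>
      simp [PySem.List.enumerate_nil, pvSpecMin, pvFirstG4, pvMerge, pvEnc, pvOr]
  | cons m ms ih =>
    rw [PySem.List.enumerate_cons, List.foldl_cons]
    have hstep : pvStepB ((pvEnc b bi0).1, (pvEnc b bi0).2, g) (i, m) =
        ((pvEnc (pvMerge b ((PySem.List.index? pvPreferidos m).map (fun r => (r, i)))) bi0).1,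
          (pvEnc (pvMerge b ((PySem.List.index? pvPreferidos m).map (fun r => (r, i)))) bi0).2,
          pvOr g (if PySem.Str.isIn "gpt-4" (PySem.Str.lower m) then some i else none)) := by
      rcases b with _ | q <;> rcases g with _ | gg <;>
        rcases hr : PySem.List.index? pvPreferidos m with _ | k <;>
          simp only [pvStepB, pvRank_eq, hr, Option.map_none, Option.map_some, pvEnc,
            pvMerge, pvOr] <;>
          try rfl
      all_goals (by_cases hlt : k < q.1 <;> simp [hlt, Nat.cast_lt])
    rw [hstep, ih (i + 1) (pvMerge b ((PySem.List.index? pvPreferidos m).map (fun r => (r, i))))]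
    rw [pvSpecMin, ← pvMerge_assoc]
    congr 1
    rw [pvFirstG4]
    rcases g with _ | gg <;> split_ifs <;> simp [pvOr]
  
theorem escolher_indice_modelo_padrao_eq (modelos : List String) :
    escolher_indice_modelo_padrao modelos = escolher_indice_modelo_padrao_alt modelos := by
  rw [escolher_indice_modelo_padrao, escolher_indice_modelo_padrao_alt,
    pvLoopPref_eq pvPreferidos modelos, pvLoopG4_eq modelos 0]
  have h := pvFold_inv modelos 0 none 0 none
  simp only [pvMerge, pvEnc, pvOr] at h
  rw [h]
  rcases pvSpecMin pvPreferidos modelos 0 with _ | q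
  · rcases pvFirstG4 modelos 0 with _ | gg <;> simp
  · simp

-- ===== VERDICT (by name: the statement is the Claim_ definition above) =====
theorem escolher_indice_modelo_padrao_spec : Claim_equal_escolher_indice_modelo_padrao := by
  intro modelos _
  unfold Spec_escolher_indice_modelo_padrao
  exact escolher_indice_modelo_padrao_eq modelos
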